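-- pv_equiv track=rewrite | github.com/br18b/crz_scraper | 04_resolve_id_collisions.py | get_key_or_prefixed
-- ===== SOURCE A (Python) =====
-- from typing import Any
--
-- def get_key_or_prefixed(d: dict[str, Any], key: str) -> tuple[Any, bool]:
--     if key in d:
--         return d[key], True
--     pref = key + "_"
--     for k in d.keys():
--         if k.startswith(pref):
--             return d[k], True
--     return None, False
-- ===== SOURCE B (Python) =====
-- def get_key_or_prefixed(d: dict, key: str) -> tuple:
--     # Single pass: exact match returns immediately; first prefix match is
--     # remembered and used only if no exact key exists anywhere.
--     pref = key + "_"
--     cand = None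
--     have = False
--     for k, v in d.items():
--         if k == key:
--             return v, True
--         if not have and k.startswith(pref):
--             cand, have = v, True
--     if have:
--         return cand, True
--     return None, False
-- ===== Notes on version B (the rewrite author's own statement) =====
-- stated objective: alternative
-- what changed: B replaces A's membership test plus separate prefix scan (two traversals) with a single traversal that returns on an exact key and remembers the first prefix candidate with an explicit found-flag.
import Mathlib
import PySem

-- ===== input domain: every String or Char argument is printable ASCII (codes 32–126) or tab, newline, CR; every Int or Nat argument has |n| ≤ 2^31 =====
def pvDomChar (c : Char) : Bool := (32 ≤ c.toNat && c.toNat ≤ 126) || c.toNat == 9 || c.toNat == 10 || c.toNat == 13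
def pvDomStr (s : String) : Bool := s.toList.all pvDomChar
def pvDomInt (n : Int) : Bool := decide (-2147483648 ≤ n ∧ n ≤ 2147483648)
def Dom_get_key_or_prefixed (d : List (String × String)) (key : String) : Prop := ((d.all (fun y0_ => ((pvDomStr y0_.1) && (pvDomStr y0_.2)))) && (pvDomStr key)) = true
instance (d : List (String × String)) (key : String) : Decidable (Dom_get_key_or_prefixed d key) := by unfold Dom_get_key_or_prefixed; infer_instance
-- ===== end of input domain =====

-- B merges A's exact-membership check and separate prefix scan into ONE traversal
-- that returns immediately on an exact key and remembers the first prefix candidate.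

-- ===== PORT A =====
-- the 'for k in d.keys(): if k.startswith(pref): return d[k], True' loop of A
def aScan (d : List (String × String)) (pref : String) : List (String × String) → Option String × Bool
  | [] => (none, false)
  | (k, _) :: rest =>
    if PySem.Str.startswith k pref then ((PySem.Dict.mk d).get? k, true)
    else aScan d pref rest

def get_key_or_prefixed (d : List (String × String)) (key : String) : Option String × Bool :=
  match (PySem.Dict.mk d).get? key with
  | some v => (some v, true)
  | none => aScan d (key ++ "_") d

-- ===== PORT B =====
-- the single for-loop of B, carrying the remembered prefix candidate (cand, have)
def bScan (key pref : String) (cand : Option String) : List (String × String) → Option String × Bool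
  | [] =>
    match cand with
    | some c => (some c, true)
    | none => (none, false)
  | (k, v) :: rest =>
    if k == key then (some v, true)
    else if cand.isNone && PySem.Str.startswith k pref then bScan key pref (some v) rest
    else bScan key pref cand rest

def get_key_or_prefixed_alt (d : List (String × String)) (key : String) : Option String × Bool :=
  bScan key (key ++ "_") none d

-- ===== PRECONDITION & SPEC =====
def Spec_get_key_or_prefixed (d : List (String × String)) (key : String) (out : Option String × Bool) : Prop := out = get_key_or_prefixed_alt d key
instance (d : List (String × String)) (key : String) (out : Option String × Bool) : Decidable (Spec_get_key_or_prefixed d key out) := by unfold Spec_get_key_or_prefixed; infer_instance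

-- ===== CLAIM (what is proved, stated in full; the proofs are below) =====
def Claim_equal_get_key_or_prefixed : Prop := ∀ (d : List (String × String)) (key : String), Dom_get_key_or_prefixed d key → Spec_get_key_or_prefixed d key (get_key_or_prefixed d key)

-- ===== LEMMAS AND PROOFS =====

-- if the key occurs, B returns its first value no matter the pending candidate
theorem bScan_of_get?_some (key pref : String) (v : String)
    (l : List (String × String)) (cand : Option String)
    (h : (PySem.Dict.mk l).get? key = some v) :
    bScan key pref cand l = (some v, true) := by
  induction l generalizing cand with
  | nil => simp [PySem.Dict.get?] at h
  | cons p rest ih =>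
    obtain ⟨k, w⟩ := p
    rw [PySem.Dict.get?_mk_cons] at h
    by_cases hk : (k == key) = true
    · simp [hk] at h
      simp [bScan, hk, h]
    · simp [hk] at h ⊢
      rw [bScan]
      simp only [hk, if_false, Bool.false_eq_true]
      split_ifs <;> exact ih _ h

-- if the key never occurs, a pending candidate survives to the end
theorem bScan_of_cand_some (key pref : String) (c : String)
    (l : List (String × String))
    (h : (PySem.Dict.mk l).get? key = none) :
    bScan key pref (some c) l = (some c, true) := by
  induction l with
  | nil => rfl
  | cons p rest ih =>
    obtain ⟨k, w⟩ := p
    rw [PySem.Dict.get?_mk_cons] at h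
    by_cases hk : (k == key) = true
    · simp [hk] at h
    · simp [hk] at h
      rw [bScan]
      simp only [hk, if_false, Bool.false_eq_true, Option.isNone_some, Bool.false_and]
      exact ih h

-- characterisation of B when the key never occurs: first prefix match wins
theorem bScan_of_get?_none (key pref : String)
    (l : List (String × String))
    (h : (PySem.Dict.mk l).get? key = none) :
    bScan key pref none l =
      match l.find? (fun p => PySem.Str.startswith p.1 pref) with
      | some p => (some p.2, true)
      | none => (none, false) := by
  induction l with
  | nil => rfl
  | cons p rest ih =>
    obtain ⟨k, w⟩ := p
    rw [PySem.Dict.get?_mk_cons] at h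
    by_cases hk : (k == key) = true
    · simp [hk] at h
    · simp [hk] at h
      rw [bScan]
      simp only [hk, if_false, Bool.false_eq_true, Option.isNone_none, Bool.true_and]
      by_cases hp : PySem.Str.startswith k pref = true
      · rw [show List.find? (fun p : String × String => PySem.Str.startswith p.1 pref) ((k, w) :: rest) = some (k, w) from List.find?_cons_of_pos hp, if_pos hp]
        exact bScan_of_cand_some key pref w rest h
      · rw [show List.find? (fun p : String × String => PySem.Str.startswith p.1 pref) ((k, w) :: rest) = List.find? (fun p : String × String => PySem.Str.startswith p.1 pref) rest from List.find?_cons_of_neg (by simpa using hp), if_neg hp]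
        exact ih h

-- A's scan ignores a prefix-free block in front
theorem aScan_append (d : List (String × String)) (pref : String)
    (l1 l2 : List (String × String))
    (h : ∀ p ∈ l1, PySem.Str.startswith p.1 pref = false) :
    aScan d pref (l1 ++ l2) = aScan d pref l2 := by
  induction l1 with
  | nil => rfl
  | cons p rest ih =>
    obtain ⟨k, w⟩ := p
    have hk := h (k, w) (by simp)
    rw [List.cons_append, aScan]
    simp only [hk, Bool.false_eq_true, if_false]
    exact ih (fun q hq => h q (by simp [hq]))

-- lookup of k in l1 ++ (k, v) :: l2 when l1 has no key equal to k
theorem get?_append_first (k v : String) (l1 l2 : List (String × String))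
    (h : ∀ p ∈ l1, (p.1 == k) = false) :
    (PySem.Dict.mk (l1 ++ (k, v) :: l2)).get? k = some v := by
  induction l1 with
  | nil => rw [List.nil_append, PySem.Dict.get?_mk_cons]; simp
  | cons p rest ih =>
    obtain ⟨k', w⟩ := p
    have hk := h (k', w) (by simp)
    rw [List.cons_append, PySem.Dict.get?_mk_cons]
    simp only [hk, Bool.false_eq_true, if_false]
    exact ih (fun q hq => h q (by simp [hq]))

-- characterisation of A's scan over the full dict, when the key never occurs
theorem aScan_full (d : List (String × String)) (key : String)
    (h : (PySem.Dict.mk d).get? key = none) :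
    aScan d (key ++ "_") d =
      match d.find? (fun p => PySem.Str.startswith p.1 (key ++ "_")) with
      | some p => (some p.2, true)
      | none => (none, false) := by
  cases hf : d.find? (fun p => PySem.Str.startswith p.1 (key ++ "_")) with
  | none =>
    have hall := List.find?_eq_none.mp hf
    have : ∀ l, (∀ p ∈ l, ¬ (PySem.Str.startswith p.1 (key ++ "_")) = true) →
        aScan d (key ++ "_") l = (none, false) := by
      intro l
      induction l with
      | nil => intro _; rfl
      | cons p rest ih =>
        intro hl
        obtain ⟨k, w⟩ := p
        have hk : PySem.Str.startswith k (key ++ "_") = false := by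
          simpa using hl (k, w) (by simp)
        rw [aScan]
        simp only [hk, Bool.false_eq_true, if_false]
        exact ih (fun q hq => hl q (by simp [hq]))
    simpa using this d hall
  | some p =>
    obtain ⟨k, v⟩ := p
    obtain ⟨l1, l2, hd, hpre, hfree⟩ :
        ∃ l1 l2, d = l1 ++ (k, v) :: l2 ∧
          PySem.Str.startswith k (key ++ "_") = true ∧
          ∀ q ∈ l1, ¬ (PySem.Str.startswith q.1 (key ++ "_")) = true := by
      have := List.find?_eq_some_iff_append.mp hf
      obtain ⟨hp, l1, l2, hd, hfree⟩ := this
      exact ⟨l1, l2, hd, hp, fun q hq => by simpa using hfree q hq⟩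
    have hfree' : ∀ q ∈ l1, PySem.Str.startswith q.1 (key ++ "_") = false := by
      intro q hq; simpa using hfree q hq
    subst hd
    rw [aScan_append _ (key ++ "_") l1 _ hfree', aScan]
    simp only [hpre, if_true]
    have hne : ∀ q ∈ l1, (q.1 == k) = false := by
      intro q hq
      cases hqe : (q.1 == k) with
      | false => rfl
      | true =>
        exfalso
        have hqk : q.1 = k := eq_of_beq hqe
        exact hfree q hq (hqk ▸ hpre)
    rw [get?_append_first k v l1 l2 hne]

-- ===== VERDICT (by name: the statement is the Claim_ definition above) =====
theorem get_key_or_prefixed_spec : Claim_equal_get_key_or_prefixed := by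
  intro d key _
  unfold Spec_get_key_or_prefixed get_key_or_prefixed get_key_or_prefixed_alt
  cases h : (PySem.Dict.mk d).get? key with
  | some v => rw [bScan_of_get?_some key (key ++ "_") v d none h]
  | none => rw [bScan_of_get?_none key (key ++ "_") d h, aScan_full d key h]
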